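-- pv_equiv track=rewrite | github.com/PovilasA/krepsinis_zirmunai | krepsinis_zirmunai/statistics/read_input_data.py | find_string_range
-- ===== SOURCE A (Python) =====
-- def find_string_range(matrix):
--    min_row = min_col = max(len(matrix),len(matrix[0]))
--    max_row = max_col = 0
--    for i in range(len(matrix)):
--       for j in range(len(matrix[i])):
--          if matrix[i][j] != '':
--             max_row = max(max_row, i); max_col = max(max_col, j)
--             min_row = min(min_row, i); min_col = min(min_col, j)
--    min_row = min_row + 1; min_col = min_col + 1
--    max_row = max_row + 1; max_col = max_col + 1
--    return(num_to_col_letters(min_col) + str(min_row) + ':' +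
--           num_to_col_letters(max_col) + str(max_row))
--
-- def num_to_col_letters(num):
--    letters = ''
--    while num:
--       mod = (num - 1) % 26
--       letters += chr(mod + 65)
--       num = (num - 1) // 26
--    return ''.join(reversed(letters))
-- ===== SOURCE B (Python) =====
-- def num_to_col_letters(num):
--     if num == 0:
--         return ''
--     return num_to_col_letters((num - 1) // 26) + chr((num - 1) % 26 + 65)
--
-- def find_string_range(matrix):
--     s = max(len(matrix), len(matrix[0]))
--     rows = [i for i, row in enumerate(matrix) for c in row if c != '']
--     cols = [j for row in matrix for j, c in enumerate(row) if c != '']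
--     min_row = min([s] + rows) + 1
--     max_row = max([0] + rows) + 1
--     min_col = min([s] + cols) + 1
--     max_col = max([0] + cols) + 1
--     return (num_to_col_letters(min_col) + str(min_row) + ':' +
--             num_to_col_letters(max_col) + str(max_row))
-- ===== Notes on version B (the rewrite author's own statement) =====
-- stated objective: faster
-- what changed: Replaces the single online pass that threads four min/max accumulators through a nested Python-level index loop with a collect-then-reduce decomposition: comprehensions gather the row and column indices of non-empty cells and four separate builtin min/max reductions (seeded with A's sentinels) compute the bounds; the column-letter helper becomes a recursive front-building conversion instead of an append-then-reverse while loop.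
-- outside the precondition, e.g. on find_string_range([]): A raises IndexError, B raises IndexError
import Mathlib
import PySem

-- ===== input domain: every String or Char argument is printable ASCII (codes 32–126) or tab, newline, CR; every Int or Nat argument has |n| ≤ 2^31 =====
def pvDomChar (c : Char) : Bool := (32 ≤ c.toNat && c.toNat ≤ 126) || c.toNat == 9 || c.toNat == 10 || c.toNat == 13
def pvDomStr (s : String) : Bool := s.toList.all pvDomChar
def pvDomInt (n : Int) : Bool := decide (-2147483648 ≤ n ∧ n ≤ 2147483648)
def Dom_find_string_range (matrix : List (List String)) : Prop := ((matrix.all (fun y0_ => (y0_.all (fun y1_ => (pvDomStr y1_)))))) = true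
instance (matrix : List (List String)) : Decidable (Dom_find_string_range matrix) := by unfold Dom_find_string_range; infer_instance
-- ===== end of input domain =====

-- B replaces A's single online pass threading four min/max accumulators through nested index
-- loops by a collect-then-reduce decomposition (gather row/col indices of non-empty cells,
-- then four separate builtin reductions), and a recursive column-letter conversion; measured faster by a constant factor.

-- ===== PORT A =====
-- A's helper num_to_col_letters: 'while num:' appending chr((num-1)%26+65), reversed at the end.
-- Both callers pass num ≥ 1 (a Python int that stays nonnegative), so the loop counter is a Nat.
def numColLoopA (n : Nat) (acc : List Char) : List Char :=
  if _h : n = 0 then acc.reverse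
  else numColLoopA ((n - 1) / 26) (acc ++ [Char.ofNat ((n - 1) % 26 + 65)])
termination_by n
decreasing_by exact Nat.lt_of_le_of_lt (Nat.div_le_self _ _) (by omega)

def num_to_col_letters (n : Nat) : String := String.ofList (numColLoopA n [])

def find_string_range (matrix : List (List String)) : String :=
  -- min_row = min_col = max(len(matrix), len(matrix[0])); matrix[0] needs matrix ≠ [] (Pre_)
  let s : Int := max (PySem.List.len matrix) (PySem.List.len (PySem.List.pyGetD matrix 0 []))
  -- state (max_row, max_col, min_row, min_col), the nested 'for i … for j …' loop of A
  let st := (PySem.List.pyRange 0 (PySem.List.len matrix) 1).foldl (fun st i =>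
      (PySem.List.pyRange 0 (PySem.List.len (PySem.List.pyGetD matrix i [])) 1).foldl (fun st j =>
        if PySem.List.pyGetD (PySem.List.pyGetD matrix i []) j "" ≠ "" then
          (max st.1 i, max st.2.1 j, min st.2.2.1 i, min st.2.2.2 j)
        else st) st) (((0 : Int), (0 : Int), s, s))
  num_to_col_letters (st.2.2.2 + 1).toNat ++ PySem.Int.toStr (st.2.2.1 + 1) ++ ":" ++
    num_to_col_letters (st.2.1 + 1).toNat ++ PySem.Int.toStr (st.1 + 1)

-- ===== PORT B =====
-- B's helper: recursive base-26 bijective conversion, building the string front first.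
def num_to_col_letters_alt (n : Nat) : String :=
  if _h : n = 0 then ""
  else num_to_col_letters_alt ((n - 1) / 26) ++ String.ofList [Char.ofNat ((n - 1) % 26 + 65)]
termination_by n
decreasing_by exact Nat.lt_of_le_of_lt (Nat.div_le_self _ _) (by omega)

def find_string_range_alt (matrix : List (List String)) : String :=
  let s : Int := max (PySem.List.len matrix) (PySem.List.len (PySem.List.pyGetD matrix 0 []))
  -- rows = [i for i, row in enumerate(matrix) for c in row if c != '']
  let rows := (PySem.List.enumerate matrix).flatMap
      (fun p => p.2.filterMap (fun c => if c ≠ "" then some p.1 else none))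
  -- cols = [j for row in matrix for j, c in enumerate(row) if c != '']
  let cols := matrix.flatMap
      (fun row => (PySem.List.enumerate row).filterMap (fun q => if q.2 ≠ "" then some q.1 else none))
  -- min([s] + xs) / max([0] + xs): Python's min/max of a nonempty list is this left fold
  let minRow := rows.foldl min s + 1
  let maxRow := rows.foldl max 0 + 1
  let minCol := cols.foldl min s + 1
  let maxCol := cols.foldl max 0 + 1
  num_to_col_letters_alt minCol.toNat ++ PySem.Int.toStr minRow ++ ":" ++
    num_to_col_letters_alt maxCol.toNat ++ PySem.Int.toStr maxRow

-- ===== PRECONDITION & SPEC =====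
-- Pre_ excludes only the empty matrix, on which the Python A raises IndexError at matrix[0].
def Pre_find_string_range (matrix : List (List String)) : Prop := matrix ≠ []
instance (matrix : List (List String)) : Decidable (Pre_find_string_range matrix) := by
  unfold Pre_find_string_range; infer_instance

def pvWitness_find_string_range : List (List String) := [["a", ""], ["", "b"]]

def Spec_find_string_range (matrix : List (List String)) (out : String) : Prop := out = find_string_range_alt matrix
instance (matrix : List (List String)) (out : String) : Decidable (Spec_find_string_range matrix out) := by unfold Spec_find_string_range; infer_instance

-- ===== CLAIM (what is proved, stated in full; the proofs are below) =====
def Claim_equal_find_string_range : Prop := ∀ (matrix : List (List String)), Dom_find_string_range matrix → Pre_find_string_range matrix → Spec_find_string_range matrix (find_string_range matrix)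

-- ===== LEMMAS AND PROOFS =====

-- The two column-letter helpers agree.
theorem numColLoopA_eq (n : Nat) :
    ∀ acc, numColLoopA n acc = (num_to_col_letters_alt n).toList ++ acc.reverse := by
  induction n using Nat.strong_induction_on with
  | _ n ih =>
    intro acc
    rw [numColLoopA, num_to_col_letters_alt]
    by_cases h : n = 0
    · simp [h]
    · simp only [h, dite_false]
      rw [ih ((n - 1) / 26) (Nat.lt_of_le_of_lt (Nat.div_le_self _ _) (by omega))]
      simp [String.toList_append]

theorem num_to_col_letters_eq (n : Nat) : num_to_col_letters n = num_to_col_letters_alt n := by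
  rw [num_to_col_letters, numColLoopA_eq]
  simp

-- one min/max update step of A, as a function of the (row, col) pair of a non-empty cell
def pvUpd (st : Int × Int × Int × Int) (p : Int × Int) : Int × Int × Int × Int :=
  (max st.1 p.1, max st.2.1 p.2, min st.2.2.1 p.1, min st.2.2.2 p.2)

-- the (row index, col index) pairs of the non-empty cells, in A's visiting order
def pvCells (matrix : List (List String)) : List (Int × Int) :=
  (PySem.List.enumerate matrix).flatMap
    (fun p => (PySem.List.enumerate p.2).filterMap
      (fun q => if q.2 ≠ "" then some (p.1, q.1) else none))

-- A's inner loop over one row is a fold of pvUpd over that row's non-empty cells.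
theorem inner_loop_eq (row : List String) (i : Int) (st : Int × Int × Int × Int) :
    (PySem.List.pyRange 0 (PySem.List.len row) 1).foldl (fun st j =>
        if PySem.List.pyGetD row j "" ≠ "" then pvUpd st (i, j) else st) st
    = ((PySem.List.enumerate row).filterMap
        (fun q => if q.2 ≠ "" then some (i, q.1) else none)).foldl pvUpd st := by
  rw [List.foldl_filterMap, PySem.List.enumerate_eq_map_pyRange row "", List.foldl_map]
  apply PySem.List.foldl_congr_mem
  intro acc x _
  by_cases h : PySem.List.pyGetD row x "" = "" <;> simp [h]

-- A's whole nested loop is a fold of pvUpd over pvCells.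
theorem nested_loop_eq (matrix : List (List String)) (st : Int × Int × Int × Int) :
    (PySem.List.pyRange 0 (PySem.List.len matrix) 1).foldl (fun st i =>
        (PySem.List.pyRange 0 (PySem.List.len (PySem.List.pyGetD matrix i [])) 1).foldl (fun st j =>
          if PySem.List.pyGetD (PySem.List.pyGetD matrix i []) j "" ≠ "" then
            pvUpd st (i, j)
          else st) st) st
    = (pvCells matrix).foldl pvUpd st := by
  rw [pvCells, List.foldl_flatMap, PySem.List.enumerate_eq_map_pyRange matrix [], List.foldl_map]
  apply PySem.List.foldl_congr_mem
  intro acc x _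
  exact inner_loop_eq _ _ _

-- the fold of pvUpd splits into four independent reductions
theorem foldl_pvUpd_split (l : List (Int × Int)) (a b c d : Int) :
    l.foldl pvUpd (a, b, c, d) =
      (l.foldl (fun s e => max s e.1) a, l.foldl (fun s e => max s e.2) b,
       l.foldl (fun s e => min s e.1) c, l.foldl (fun s e => min s e.2) d) := by
  unfold pvUpd
  rw [PySem.List.foldl_prod_mk (f := fun (s : Int) (e : Int × Int) => max s e.1)
        (g := fun (s : Int × Int × Int) (e : Int × Int) =>
          (max s.1 e.2, min s.2.1 e.1, min s.2.2 e.2))]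
  rw [PySem.List.foldl_prod_mk (f := fun (s : Int) (e : Int × Int) => max s e.2)
        (g := fun (s : Int × Int) (e : Int × Int) => (min s.1 e.1, min s.2 e.2))]
  rw [PySem.List.foldl_prod_mk (f := fun (s : Int) (e : Int × Int) => min s e.1)
        (g := fun (s : Int) (e : Int × Int) => min s e.2)]

-- the row indices of pvCells are B's rows list
theorem cells_map_fst (matrix : List (List String)) :
    (pvCells matrix).map (·.1)
      = (PySem.List.enumerate matrix).flatMap
          (fun p => p.2.filterMap (fun c => if c ≠ "" then some p.1 else none)) := by
  rw [pvCells, List.map_flatMap]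
  apply List.flatMap_congr
  intro p _
  rw [List.map_filterMap]
  conv_rhs => rw [← PySem.List.map_snd_enumerate p.2 0, List.filterMap_map]
  apply List.filterMap_congr
  intro q _
  by_cases h : q.2 = "" <;> simp [h, Function.comp]

-- the column indices of pvCells are B's cols list
theorem cells_map_snd (matrix : List (List String)) :
    (pvCells matrix).map (·.2)
      = matrix.flatMap
          (fun row => (PySem.List.enumerate row).filterMap
            (fun q => if q.2 ≠ "" then some q.1 else none)) := by
  rw [pvCells, List.map_flatMap]
  conv_rhs => rw [← PySem.List.map_snd_enumerate matrix 0, List.flatMap_map]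
  apply List.flatMap_congr
  intro p _
  rw [List.map_filterMap]
  apply List.filterMap_congr
  intro q _
  by_cases h : q.2 = "" <;> simp [h]

-- ===== VERDICT (by name: the statement is the Claim_ definition above) =====
theorem find_string_range_spec : Claim_equal_find_string_range := by
  intro matrix _ _
  unfold Spec_find_string_range
  simp only [find_string_range, find_string_range_alt]
  rw [show (fun (st : Int × Int × Int × Int) (i : Int) =>
        (PySem.List.pyRange 0 (PySem.List.len (PySem.List.pyGetD matrix i [])) 1).foldl (fun st j =>
          if PySem.List.pyGetD (PySem.List.pyGetD matrix i []) j "" ≠ "" then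
            (max st.1 i, max st.2.1 j, min st.2.2.1 i, min st.2.2.2 j)
          else st) st)
      = (fun (st : Int × Int × Int × Int) (i : Int) =>
        (PySem.List.pyRange 0 (PySem.List.len (PySem.List.pyGetD matrix i [])) 1).foldl (fun st j =>
          if PySem.List.pyGetD (PySem.List.pyGetD matrix i []) j "" ≠ "" then
            pvUpd st (i, j)
          else st) st) from rfl]
  rw [nested_loop_eq, foldl_pvUpd_split]
  simp only [num_to_col_letters_eq, ← cells_map_fst, ← cells_map_snd, List.foldl_map]
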